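-- pv_equiv track=rewrite | github.com/araech/dizzyprice | dizzyprice.py | prune_list
-- ===== SOURCE A (Python) =====
-- def prune_list(items, search_values):
--     pruned = []
--     for item in items:
--         if (item[0].find(search_values[0]) >= 0) or (item[1].find(search_values[0]) >= 0):
--             pruned.append(item)
--     if (len(search_values) <= 1):
--         return pruned
--     return prune_list(pruned[:], search_values[1:])
-- ===== SOURCE B (Python) =====
-- def prune_list(items, search_values):
--     return [item for item in items
--             if all(item[0].find(v) >= 0 or item[1].find(v) >= 0
--                    for v in search_values)]
-- ===== Notes on version B (the rewrite author's own statement) =====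
-- stated objective: simpler
-- what changed: Replaces the recursive multi-pass filtering (one full pass and one list copy per search value) by a single list comprehension that keeps an item iff every search value occurs in one of its two fields.
-- crash fix: On a non-empty items list with an empty search_values list A raises IndexError (it reads search_values[0] inside the loop); B returns items unchanged (the empty conjunction of constraints). — e.g. on prune_list([("a", "b")], []): A raises IndexError, B returns [("a", "b")]
import Mathlib
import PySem

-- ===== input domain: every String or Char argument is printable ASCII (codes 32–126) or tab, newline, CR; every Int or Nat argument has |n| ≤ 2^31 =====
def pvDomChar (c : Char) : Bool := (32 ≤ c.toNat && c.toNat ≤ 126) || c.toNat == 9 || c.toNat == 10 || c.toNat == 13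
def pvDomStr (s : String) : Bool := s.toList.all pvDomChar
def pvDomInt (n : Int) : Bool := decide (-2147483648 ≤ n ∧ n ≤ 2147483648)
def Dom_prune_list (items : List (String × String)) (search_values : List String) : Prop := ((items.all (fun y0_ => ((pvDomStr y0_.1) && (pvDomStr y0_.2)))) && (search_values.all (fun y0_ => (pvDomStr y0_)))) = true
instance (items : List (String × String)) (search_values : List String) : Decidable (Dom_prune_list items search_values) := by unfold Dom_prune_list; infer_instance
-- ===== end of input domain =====

-- B is a single list comprehension keeping an item iff every search value occurs in one of
-- its two fields, instead of A's recursion making one filtering pass (and a list copy) per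
-- search value; equivalence of the return values is proved on Pre_ (A raises outside it).

-- ===== PORT A =====
def prune_list (items : List (String × String)) (search_values : List String) : List (String × String) :=
  match search_values with
  | [] => []
      -- Python: with search_values = [] the loop body reads search_values[0] and raises
      -- IndexError unless items = [] (excluded by Pre_); with items = [] the loop never
      -- runs, pruned = [], len(search_values) ≤ 1, and [] is returned.
  | v :: rest =>
      let pruned := items.foldl (fun acc item =>
        if PySem.Str.find item.1 v ≥ 0 ∨ PySem.Str.find item.2 v ≥ 0
        then acc ++ [item] else acc) []
      if (v :: rest).length ≤ 1 then pruned else prune_list pruned rest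

-- ===== PORT B =====
def prune_list_alt (items : List (String × String)) (search_values : List String) : List (String × String) :=
  items.filter (fun item => search_values.all (fun v =>
    decide (PySem.Str.find item.1 v ≥ 0) || decide (PySem.Str.find item.2 v ≥ 0)))

-- ===== PRECONDITION & SPEC =====
-- Pre_ excludes exactly the inputs where A raises IndexError: empty search_values with non-empty items.
def Pre_prune_list (items : List (String × String)) (search_values : List String) : Prop :=
  search_values ≠ [] ∨ items = []
instance (items : List (String × String)) (search_values : List String) : Decidable (Pre_prune_list items search_values) := by unfold Pre_prune_list; infer_instance
def pvWitness_prune_list : (List (String × String)) × List String := ([("apple pie", "dessert"), ("soup", "starter")], ["p", "e"])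

-- On a non-empty items list with an empty search_values list A raises IndexError
-- (it reads search_values[0] inside the loop); B returns items unchanged.
def Raises_prune_list (items : List (String × String)) (search_values : List String) : Prop :=
  items ≠ [] ∧ search_values = []
instance (items : List (String × String)) (search_values : List String) : Decidable (Raises_prune_list items search_values) := by unfold Raises_prune_list; infer_instance
def pvRaiseWitness_prune_list : (List (String × String)) × List String := ([("a", "b")], [])
def pvRaiseWitnessOut_prune_list : List (String × String) := [("a", "b")]

def Spec_prune_list (items : List (String × String)) (search_values : List String) (out : List (String × String)) : Prop := out = prune_list_alt items search_values
instance (items : List (String × String)) (search_values : List String) (out : List (String × String)) : Decidable (Spec_prune_list items search_values out) := by unfold Spec_prune_list; infer_instance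

-- ===== CLAIM (what is proved, stated in full; the proofs are below) =====
def Claim_equal_prune_list : Prop := ∀ (items : List (String × String)) (search_values : List String), Dom_prune_list items search_values → Pre_prune_list items search_values → Spec_prune_list items search_values (prune_list items search_values)
def Claim_raises_prune_list : Prop := (∀ (items : List (String × String)) (search_values : List String), Dom_prune_list items search_values → Raises_prune_list items search_values → ¬ Pre_prune_list items search_values) ∧ (Dom_prune_list (pvRaiseWitness_prune_list.1) (pvRaiseWitness_prune_list.2) ∧ Raises_prune_list (pvRaiseWitness_prune_list.1) (pvRaiseWitness_prune_list.2) ∧ prune_list_alt (pvRaiseWitness_prune_list.1) (pvRaiseWitness_prune_list.2) = pvRaiseWitnessOut_prune_list)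

-- ===== LEMMAS AND PROOFS =====

lemma prune_list_eq_alt : ∀ (search_values : List String) (items : List (String × String)),
    Pre_prune_list items search_values → prune_list items search_values = prune_list_alt items search_values
  | [], items, h => by
      rcases h with h | h
      · exact absurd rfl h
      · subst h; rfl
  | v :: rest, items, _ => by
      rw [prune_list]
      simp only [PySem.List.foldl_append_ite_eq_filter, List.nil_append]
      rcases eq_or_ne rest [] with hr | hr
      · subst hr
        simp [prune_list_alt]
      · have hlen : ¬ (v :: rest).length ≤ 1 := by
          cases rest with
          | nil => exact absurd rfl hr
          | cons a t => simp [List.length]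
        rw [if_neg hlen,
          prune_list_eq_alt rest _ (Or.inl hr)]
        simp [prune_list_alt, List.filter_filter, Bool.and_comm]

-- ===== VERDICT (by name: the statement is the Claim_ definition above) =====
theorem prune_list_spec : Claim_equal_prune_list := by
  intro items svs _ hpre
  exact prune_list_eq_alt svs items hpre

@[simp] theorem prune_list_raises : Claim_raises_prune_list := by
  unfold Claim_raises_prune_list
  refine ⟨fun items svs _ ⟨hi, hs⟩ => ?_, by decide⟩
  rintro (h | h)
  · exact h hs
  · exact hi h
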